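-- pv_equiv track=rewrite | github.com/camayal/dmiGenerator | dmiGenerator.py | reconstruct_lineage_history
-- ===== SOURCE A (Python) =====
-- def _get_gene_state(gene_state):
--     """Function for controling splits in one place"""
--     return gene_state.split("/")
--
-- def reconstruct_lineage_history(lineage):
--     """Reconstruct the history of mutation (in a finite site model) of every gene
--         A genome history ABC will have three slides in the history (ordered from past to present): Abc, ABc, ABC
--     """
--     lineage_new_history = []
--     for index in range(len(lineage)):
--         slice = []
--         #split the genes increasing one by one, to mantain this part in the
--         #same state as the lineage (present time), in the first round it a lineage
--         #with this genome history:  AbCDEf will be Abcdef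
--         for _genestate in lineage[:index + 1]:
--             slice.append(_genestate)
--
--         # the rest of genes (in this case decreasing one by one), are change to
--         # the anscestral state
--         for _genestate in lineage[index + 1:]:
--             _gene, _state = _get_gene_state(_genestate)
--             slice.append(f"{_gene}/0")
--
--         # append every slice
--         lineage_new_history.append(slice)
--
--     return lineage_new_history
-- ===== SOURCE B (Python) =====
-- def reconstruct_lineage_history(lineage):
--     """Reconstruct the history of mutation, past to present, as a running state:
--     start from the fully-ancestral state (position 0 kept as-is, the rest reset
--     to gene/0), then reveal one present gene per step and snapshot."""
--     n = len(lineage)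
--     if n == 0:
--         return []
--     current = [lineage[0]]
--     for _genestate in lineage[1:]:
--         _gene, _state = _genestate.split("/")
--         current.append(f"{_gene}/0")
--     history = []
--     for i in range(n):
--         current[i] = lineage[i]
--         history.append(list(current))
--     return history
-- ===== Notes on version B (the rewrite author's own statement) =====
-- stated objective: alternative
-- what changed: Instead of rebuilding every slice with two inner loops (copy prefix, re-split and reset the whole suffix each time), B splits each gene once up front into its ancestral form, keeps one running state list, and per step overwrites a single position with the present gene and snapshots a copy.
import Mathlib
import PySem

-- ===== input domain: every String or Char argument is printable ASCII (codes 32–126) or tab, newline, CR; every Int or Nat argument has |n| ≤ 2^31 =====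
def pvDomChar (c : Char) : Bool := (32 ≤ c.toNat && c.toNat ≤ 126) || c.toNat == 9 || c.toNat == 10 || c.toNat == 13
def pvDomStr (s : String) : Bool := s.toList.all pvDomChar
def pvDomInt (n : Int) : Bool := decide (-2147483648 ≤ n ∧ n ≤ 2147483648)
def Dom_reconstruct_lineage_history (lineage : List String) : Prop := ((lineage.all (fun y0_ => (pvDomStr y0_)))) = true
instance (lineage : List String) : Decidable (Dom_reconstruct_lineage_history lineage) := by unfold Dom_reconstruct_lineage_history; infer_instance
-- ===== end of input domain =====

-- B replaces A's per-slice pair of inner loops by a single running state that is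
-- mutated once per step and snapshotted (objective: simpler, one pass of work per step).

-- ===== PORT A =====
-- A: for each index, copy the prefix, then rebuild the suffix in ancestral form.
-- `_gene, _state = _genestate.split("/")` raises ValueError unless the split has
-- exactly 2 parts; PySem.Str.split? returns some parts (sep ≠ ""), the non-2-part
-- case is excluded by Pre_ (the fold skips such an element there).
def reconstruct_lineage_history (lineage : List String) : List (List String) :=
  (PySem.List.pyRange 0 (lineage.length : Int) 1).foldl (fun hist index =>
    let slice1 := (PySem.List.slice lineage none (some (index + 1))).foldl
      (fun s g => s ++ [g]) ([] : List String)
    let slice2 := (PySem.List.slice lineage (some (index + 1)) none).foldl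
      (fun s g =>
        match PySem.Str.split? g "/" with
        | some [gene, _state] => s ++ [PySem.Str.join "" [gene, "/0"]]
        | _ => s) slice1
    hist ++ [slice2]) []

-- ===== PORT B =====
-- ancestral form of one gene; the fallback branch is the ValueError case of
-- Source B's unpacking, excluded by Pre_.
def pvAnc (g : String) : String :=
  match PySem.Str.split? g "/" with
  | none => g
  | some parts =>
    -- Source B's 'gene, state = _genestate.split("/")': succeeds iff exactly 2 parts
    if h : parts.length = 2 then
      PySem.Str.join "" [parts[0]'(by omega), "/0"]
    else g

def reconstruct_lineage_history_alt (lineage : List String) : List (List String) :=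
  match lineage with
  | [] => []
  | g0 :: rest =>
    let current := g0 :: rest.map pvAnc
    (((PySem.List.pyRange 0 ((g0 :: rest).length : Int) 1).foldl
      (fun (st : List String × List (List String)) i =>
        -- current[i] = lineage[i]; i ∈ range(n) so i.toNat is exact
        let cur := st.1.set i.toNat (PySem.List.pyGetD (g0 :: rest) i "")
        (cur, st.2 ++ [cur])) (current, ([] : List (List String))))).2

-- ===== PRECONDITION & SPEC =====
-- Pre_ excludes exactly the inputs on which both Pythons raise ValueError:
-- some gene past position 0 does not split on "/" into exactly two parts.
def Pre_reconstruct_lineage_history (lineage : List String) : Prop :=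
  ∀ s ∈ lineage.drop 1, (PySem.Str.split? s "/").map List.length = some 2
instance (lineage : List String) : Decidable (Pre_reconstruct_lineage_history lineage) := by
  unfold Pre_reconstruct_lineage_history; infer_instance

def pvWitness_reconstruct_lineage_history : List String := ["A/1", "b/0", "C/2"]

def Spec_reconstruct_lineage_history (lineage : List String) (out : List (List String)) : Prop := out = reconstruct_lineage_history_alt lineage
instance (lineage : List String) (out : List (List String)) : Decidable (Spec_reconstruct_lineage_history lineage out) := by unfold Spec_reconstruct_lineage_history; infer_instance

-- ===== CLAIM (what is proved, stated in full; the proofs are below) =====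
def Claim_equal_reconstruct_lineage_history : Prop := ∀ (lineage : List String), Dom_reconstruct_lineage_history lineage → Pre_reconstruct_lineage_history lineage → Spec_reconstruct_lineage_history lineage (reconstruct_lineage_history lineage)

-- ===== LEMMAS AND PROOFS =====

-- the common characterisation: slice k = present prefix (k+1 genes) ++ ancestral rest
def pvTarget (lineage : List String) : List (List String) :=
  (List.range lineage.length).map
    (fun k => lineage.take (k + 1) ++ (lineage.drop (k + 1)).map pvAnc)

lemma A_eq_target (lineage : List String)
    (hpre : Pre_reconstruct_lineage_history lineage) :
    reconstruct_lineage_history lineage = pvTarget lineage := by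
  unfold reconstruct_lineage_history pvTarget
  rw [PySem.List.pyRange_zero_nat, List.foldl_map, PySem.List.foldl_append_singleton_eq_map]
  rw [List.nil_append]
  apply List.map_congr_left
  intro k hk
  rw [PySem.List.slice_to lineage (by omega : (0:Int) ≤ (k:Int) + 1),
      PySem.List.slice_from lineage (by omega : (0:Int) ≤ (k:Int) + 1),
      PySem.List.foldl_append_singleton]
  have htn : ((k : Int) + 1).toNat = k + 1 := by omega
  rw [htn, List.nil_append]
  rw [PySem.List.foldl_congr_mem _ _ (fun s g => s ++ [pvAnc g]) _ ?_,
      PySem.List.foldl_append_singleton_eq_map]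
  intro acc g hg
  have hg1 : g ∈ lineage.drop 1 := by
    have : lineage.drop (k + 1) = (lineage.drop 1).drop k := by
      rw [List.drop_drop, Nat.add_comm]
    rw [this] at hg
    exact List.mem_of_mem_drop hg
  have h2 := hpre g hg1
  unfold pvAnc
  cases hsp : PySem.Str.split? g "/" with
  | none => rw [hsp] at h2; simp at h2
  | some l =>
    rw [hsp] at h2
    simp only [Option.map_some, Option.some.injEq] at h2
    match l, h2 with
    | [a, b], _ => simp [hsp]

-- one step of B's running-state update: revealing gene j turns the j-boundary
-- state into the (j+1)-boundary state
lemma set_step (lineage cur0 : List String) (j : Nat)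
    (hlen : cur0.length = lineage.length) (hj : j < lineage.length) :
    (lineage.take j ++ cur0.drop j).set j (lineage.getD j "")
      = lineage.take (j + 1) ++ cur0.drop (j + 1) := by
  have hjc : j < cur0.length := by omega
  have hdrop : cur0.drop j = cur0[j] :: cur0.drop (j + 1) := by
    rw [List.drop_eq_getElem_cons hjc]
  have hlt : (lineage.take j).length = j := by
    simp [List.length_take]; omega
  rw [hdrop, List.set_append]
  simp only [hlt, Nat.lt_irrefl, Nat.sub_self, List.set_cons_zero,
    List.getD_eq_getElem?_getD, List.getElem?_eq_getElem hj, Option.getD_some]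
  rw [show lineage.take (j + 1) = lineage.take j ++ [lineage[j]] from by
        rw [List.take_add_one, List.getElem?_eq_getElem hj]; rfl,
      List.append_assoc]
  rfl

-- the loop invariant of B's snapshot loop, over an arbitrary tail of range n
lemma loopInv (lineage cur0 : List String) (hlen : cur0.length = lineage.length) :
    ∀ (m j : Nat), j + m = lineage.length → ∀ (hist : List (List String)),
    (List.range' j m).foldl
        (fun (st : List String × List (List String)) i =>
          let cur := st.1.set i (lineage.getD i "")
          (cur, st.2 ++ [cur]))
        (lineage.take j ++ cur0.drop j, hist)
      = (lineage.take lineage.length ++ cur0.drop lineage.length,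
         hist ++ (List.range' j m).map
           (fun k => lineage.take (k + 1) ++ cur0.drop (k + 1))) := by
  intro m
  induction m with
  | zero =>
    intro j hj hist
    have hje : j = lineage.length := by omega
    rw [hje]
    simp
  | succ m ih =>
    intro j hj hist
    rw [List.range'_succ, List.foldl_cons, List.map_cons]
    simp only
    rw [set_step lineage cur0 j hlen (by omega)]
    rw [ih (j + 1) (by omega)]
    simp

lemma B_eq_target (lineage : List String) :
    reconstruct_lineage_history_alt lineage = pvTarget lineage := by
  cases lineage with
  | nil => rfl
  | cons g0 rest =>
    unfold reconstruct_lineage_history_alt pvTarget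
    simp only
    rw [PySem.List.pyRange_zero_nat, List.foldl_map]
    have hstep : ∀ (st : List String × List (List String)) (i : Nat),
        (fun (st : List String × List (List String)) (i : Int) =>
          ((st.1.set i.toNat (PySem.List.pyGetD (g0 :: rest) i ""),
            st.2 ++ [st.1.set i.toNat (PySem.List.pyGetD (g0 :: rest) i "")]) :
            List String × List (List String))) st (i : Int)
        = (st.1.set i ((g0 :: rest).getD i ""),
           st.2 ++ [st.1.set i ((g0 :: rest).getD i "")]) := by
      intro st i
      simp [PySem.List.pyGetD_natCast]
    rw [PySem.List.foldl_congr_mem _ _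
        (fun (st : List String × List (List String)) (i : Nat) =>
          (st.1.set i ((g0 :: rest).getD i ""),
           st.2 ++ [st.1.set i ((g0 :: rest).getD i "")])) _
        (fun acc x _ => hstep acc x)]
    have hlen : (g0 :: rest.map pvAnc).length = (g0 :: rest).length := by simp
    have h0 : (g0 :: rest).take 0 ++ (g0 :: rest.map pvAnc).drop 0
        = g0 :: rest.map pvAnc := by simp
    rw [List.range_eq_range', ← h0,
        loopInv (g0 :: rest) (g0 :: rest.map pvAnc) hlen (g0 :: rest).length 0 (by omega) []]
    simp only [List.nil_append, ← List.range_eq_range']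
    apply List.map_congr_left
    intro k hk
    congr 1
    show (g0 :: rest.map pvAnc).drop (k + 1) = ((g0 :: rest).drop (k + 1)).map pvAnc
    simp [List.map_drop]

-- ===== VERDICT (by name: the statement is the Claim_ definition above) =====
theorem reconstruct_lineage_history_spec : Claim_equal_reconstruct_lineage_history := by
  intro lineage _ hpre
  unfold Spec_reconstruct_lineage_history
  rw [A_eq_target lineage hpre, B_eq_target lineage]
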